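-- pv_equiv track=rewrite | github.com/rpcorb/mean_grades_exercise | student_grades_exercise.py | drop_lowest
-- ===== SOURCE A (Python) =====
-- def drop_lowest(numbers):
--     numbers_filtered = []
--     if len(numbers) <= 1:
--         return numbers
--     lowest = numbers[0]
--     for i in range(1,len(numbers)):
--         if numbers[i] < lowest:
--             numbers_filtered.append(lowest)
--             lowest = numbers[i]
--         else:
--             numbers_filtered.append(numbers[i])
--     return numbers_filtered
-- ===== SOURCE B (Python) =====
-- def drop_lowest(numbers):
--     if len(numbers) <= 1:
--         return numbers
--     tail = numbers[1:]
--     prefix_mins = []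
--     pref = numbers[0]
--     for x in tail:
--         prefix_mins.append(pref)
--         pref = min(pref, x)
--     return [max(p, x) for p, x in zip(prefix_mins, tail)]
-- ===== Notes on version B (the rewrite author's own statement) =====
-- stated objective: alternative
-- what changed: Replaces A's single loop of conditional appends (append old lowest on a new minimum, else the element) by a two-phase formulation: first a scan computing the prefix minima of the list, then an elementwise max of each prefix minimum with the next element, expressing the result as out[i] = max(min(numbers[0..i]), numbers[i+1]).
import Mathlib
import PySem

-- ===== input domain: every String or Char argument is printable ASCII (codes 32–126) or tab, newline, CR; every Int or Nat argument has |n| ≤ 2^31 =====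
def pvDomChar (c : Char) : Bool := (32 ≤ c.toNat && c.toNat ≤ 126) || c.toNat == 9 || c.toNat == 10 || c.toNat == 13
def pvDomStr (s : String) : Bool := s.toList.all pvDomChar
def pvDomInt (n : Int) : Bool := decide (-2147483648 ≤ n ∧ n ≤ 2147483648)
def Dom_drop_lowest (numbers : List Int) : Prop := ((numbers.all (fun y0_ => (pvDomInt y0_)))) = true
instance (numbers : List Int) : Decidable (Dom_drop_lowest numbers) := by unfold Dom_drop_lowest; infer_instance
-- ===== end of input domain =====

-- B replaces A's running-minimum loop of conditional appends by a prefix-minima scan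
-- followed by an elementwise max with the next element (objective: alternative).

-- ===== PORT A =====
def drop_lowest (numbers : List Int) : List Int :=
  if numbers.length ≤ 1 then numbers
  else
    let lowest := PySem.List.pyGetD numbers 0 0
    let st := (PySem.List.pyRange 1 (numbers.length : Int) 1).foldl
      (fun (st : List Int × Int) i =>
        let x := PySem.List.pyGetD numbers i 0
        if x < st.2 then (st.1 ++ [st.2], x) else (st.1 ++ [x], st.2))
      (([] : List Int), lowest)
    st.1

-- ===== PORT B =====
def drop_lowest_alt (numbers : List Int) : List Int :=
  if numbers.length ≤ 1 then numbers
  else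
    let tail := PySem.List.slice numbers (some 1) none
    let st := tail.foldl
      (fun (st : List Int × Int) x => (st.1 ++ [st.2], min st.2 x))
      (([] : List Int), PySem.List.pyGetD numbers 0 0)
    (st.1.zip tail).map (fun px => max px.1 px.2)

-- ===== PRECONDITION & SPEC =====
def Spec_drop_lowest (numbers : List Int) (out : List Int) : Prop := out = drop_lowest_alt numbers
instance (numbers : List Int) (out : List Int) : Decidable (Spec_drop_lowest numbers out) := by unfold Spec_drop_lowest; infer_instance

-- ===== CLAIM (what is proved, stated in full; the proofs are below) =====
def Claim_equal_drop_lowest : Prop := ∀ (numbers : List Int), Dom_drop_lowest numbers → Spec_drop_lowest numbers (drop_lowest numbers)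

-- ===== LEMMAS AND PROOFS =====

/-- The prefix minima of `t` seeded with `low`: entry i is `min(low, t[0..i-1])`. -/
def pvMins (low : Int) : List Int → List Int
  | [] => []
  | x :: xs => low :: pvMins (min low x) xs

theorem pv_foldA (t : List Int) : ∀ (acc : List Int) (low : Int),
    (t.foldl (fun (st : List Int × Int) x =>
        if x < st.2 then (st.1 ++ [st.2], x) else (st.1 ++ [x], st.2)) (acc, low)).1
      = acc ++ ((pvMins low t).zip t).map (fun px => max px.1 px.2) := by
  induction t with
  | nil => intro acc low; simp
  | cons x xs ih =>
    intro acc low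
    simp only [List.foldl_cons, pvMins, List.zip_cons_cons, List.map_cons]
    by_cases h : x < low
    · simp only [if_pos h]
      rw [ih]
      have h1 : min low x = x := by omega
      have h2 : max low x = low := by omega
      simp [h1, h2]
    · simp only [if_neg h]
      rw [ih]
      have h1 : min low x = low := by omega
      have h2 : max low x = x := by omega
      simp [h1, h2]

theorem pv_foldB (t : List Int) : ∀ (acc : List Int) (low : Int),
    (t.foldl (fun (st : List Int × Int) x => (st.1 ++ [st.2], min st.2 x)) (acc, low)).1
      = acc ++ pvMins low t := by
  induction t with
  | nil => intro acc low; simp [pvMins]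
  | cons x xs ih =>
    intro acc low
    simp only [List.foldl_cons, pvMins]
    rw [ih]
    simp

-- ===== VERDICT (by name: the statement is the Claim_ definition above) =====
theorem drop_lowest_spec : Claim_equal_drop_lowest := by
  intro numbers _
  unfold Spec_drop_lowest drop_lowest drop_lowest_alt
  by_cases h : numbers.length ≤ 1
  · simp [h]
  · simp only [if_neg h]
    rw [PySem.List.slice_from_one]
    have hA := PySem.List.foldl_pyRange_pyGetD' (xs := numbers) (d := 0) (a := 1)
      (f := fun (st : List Int × Int) x =>
        if x < st.2 then (st.1 ++ [st.2], x) else (st.1 ++ [x], st.2))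
      (init := (([] : List Int), PySem.List.pyGetD numbers 0 0)) (by omega)
    simp only [hA]
    have h1 : (1 : Int).toNat = 1 := rfl
    rw [h1, List.drop_one]
    rw [pv_foldA, pv_foldB]
    simp
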